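-- pv_equiv track=rewrite | github.com/puffo-ai/puffo-agent | src/puffo_agent/portal/api/handlers.py | _derive_role_short
-- ===== SOURCE A (Python) =====
-- MAX_ROLE_SHORT_LEN = 32
--
-- def _derive_role_short(role: str) -> str:
--     """Local mirror of puffo-server's ``derive_role_short``: pull a
--     short chip label out of a ``<short>: <description>``-shaped role
--     string. Returns ``""`` for any shape the server would also
--     reject (no colon, empty prefix, whitespace in prefix, empty
--     suffix, prefix > ``MAX_ROLE_SHORT_LEN``). Kept in sync with
--     ``profiles::derive_role_short`` in puffo-server."""
--     if ":" not in role: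
--         return ""
--     colon_pos = role.index(":")
--     candidate = role[:colon_pos].strip()
--     rest = role[colon_pos + 1:].strip()
--     if not candidate or not rest:
--         return ""
--     if len(candidate) > MAX_ROLE_SHORT_LEN:
--         return ""
--     if any(ch.isspace() for ch in candidate):
--         return ""
--     return candidate
-- ===== SOURCE B (Python) =====
-- MAX_ROLE_SHORT_LEN = 32
--
-- def _derive_role_short(role: str) -> str:
--     """Single forward scan: skip leading whitespace, read one colon-free
--     non-space token, skip whitespace, require a ':' next and some
--     non-space character after it."""
--     n = len(role)
--     i = 0
--     while i < n and role[i].isspace():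
--         i += 1
--     j = i
--     while j < n and role[j] != ":" and not role[j].isspace():
--         j += 1
--     k = j
--     while k < n and role[k].isspace():
--         k += 1
--     if (k < n and role[k] == ":" and j > i and j - i <= MAX_ROLE_SHORT_LEN
--             and any(not c.isspace() for c in role[k + 1:])):
--         return role[i:j]
--     return ""
-- ===== Notes on version B (the rewrite author's own statement) =====
-- stated objective: alternative
-- what changed: A finds the first colon, slices the string into prefix/suffix, strips both and then re-validates the prefix with separate emptiness/length/whitespace checks; B never slices or strips: it makes one forward scan with three index loops (skip whitespace, read one colon-free non-space token, skip whitespace), requires the next character to be ':' and checks that a non-space character follows it.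
import Mathlib
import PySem

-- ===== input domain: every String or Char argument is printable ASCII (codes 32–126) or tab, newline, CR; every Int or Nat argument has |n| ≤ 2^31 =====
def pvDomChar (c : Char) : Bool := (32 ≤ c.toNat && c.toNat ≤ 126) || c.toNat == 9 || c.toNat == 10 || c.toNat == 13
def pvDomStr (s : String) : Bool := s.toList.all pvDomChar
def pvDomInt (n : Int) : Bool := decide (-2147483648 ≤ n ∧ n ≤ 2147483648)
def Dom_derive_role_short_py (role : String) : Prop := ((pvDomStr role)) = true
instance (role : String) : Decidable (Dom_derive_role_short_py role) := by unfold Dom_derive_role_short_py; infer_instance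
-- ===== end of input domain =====

-- B replaces A's membership-test/index/slice/strip/guard chain by a single forward scan
-- (skip whitespace, read one colon-free token, skip whitespace, expect ':', check the rest):
-- an alternative decomposition of the same cost.

-- ===== PORT A =====
def MAX_ROLE_SHORT_LEN : Int := 32

def derive_role_short_py (role : String) : String :=
  if !PySem.Str.isIn ":" role then "" else
  -- role.index(":") is guarded by the membership test above, so it never raises and equals find
  let colon_pos : Int := PySem.Str.find role ":"
  let candidate : String := PySem.Str.strip (PySem.Str.slice role none (some colon_pos))
  let rest : String := PySem.Str.strip (PySem.Str.slice role (some (colon_pos + 1)) none)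
  if PySem.Str.len candidate == 0 || PySem.Str.len rest == 0 then "" else
  if MAX_ROLE_SHORT_LEN < PySem.Str.len candidate then "" else
  if candidate.toList.any PySem.Chars.isspace then "" else
  candidate

-- ===== PORT B =====
-- 'while i < n and role[i].isspace(): i += 1' — structural recursion over the unscanned suffix
def bSkipWs : List Char → List Char
  | [] => []
  | c :: cs => if PySem.Chars.isspace c then bSkipWs cs else c :: cs

-- 'while j < n and role[j] != ":" and not role[j].isspace(): j += 1' — returns (role[i:j], suffix from j)
def bToken : List Char → List Char × List Char
  | [] => ([], [])
  | c :: cs =>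
    if c == ':' || PySem.Chars.isspace c then ([], c :: cs)
    else
      let p := bToken cs
      (c :: p.1, p.2)

def derive_role_short_py_alt (role : String) : String :=
  let s1 := bSkipWs role.toList
  let p := bToken s1
  let s3 := bSkipWs p.2
  match s3 with
  | [] => ""                       -- k = n: no ':' found
  | c :: rest =>
    if c == ':' then
      if p.1.length != 0 && decide (p.1.length ≤ 32) && rest.any (fun x => !PySem.Chars.isspace x)
      then String.ofList p.1 else ""
    else ""

-- ===== PRECONDITION & SPEC =====
def Spec_derive_role_short_py (role : String) (out : String) : Prop := out = derive_role_short_py_alt role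
instance (role : String) (out : String) : Decidable (Spec_derive_role_short_py role out) := by unfold Spec_derive_role_short_py; infer_instance

-- ===== CLAIM (what is proved, stated in full; the proofs are below) =====
def Claim_equal_derive_role_short_py : Prop := ∀ (role : String), Dom_derive_role_short_py role → Spec_derive_role_short_py role (derive_role_short_py role)

-- ===== LEMMAS AND PROOFS =====

-- list-level mirrors of the two ports (proof helpers only)
def aCore (cs : List Char) : List Char :=
  if !PySem.Chars.isIn [':'] cs then [] else
  let colon_pos : Int := PySem.Chars.find cs [':']
  let candidate : List Char := PySem.Chars.strip (PySem.Chars.slice cs none (some colon_pos))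
  let rest : List Char := PySem.Chars.strip (PySem.Chars.slice cs (some (colon_pos + 1)) none)
  if (candidate.length : Int) == 0 || (rest.length : Int) == 0 then [] else
  if MAX_ROLE_SHORT_LEN < (candidate.length : Int) then [] else
  if candidate.any PySem.Chars.isspace then [] else
  candidate

def bCore (cs : List Char) : List Char :=
  let s1 := bSkipWs cs
  let p := bToken s1
  let s3 := bSkipWs p.2
  match s3 with
  | [] => []
  | c :: rest =>
    if c == ':' then
      if p.1.length != 0 && decide (p.1.length ≤ 32) && rest.any (fun x => !PySem.Chars.isspace x)
      then p.1 else []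
    else []

def tokP (c : Char) : Bool := !(c == ':' || PySem.Chars.isspace c)

lemma bSkipWs_eq (l : List Char) : bSkipWs l = l.dropWhile PySem.Chars.isspace := by
  induction l with
  | nil => rfl
  | cons c cs ih => by_cases h : PySem.Chars.isspace c <;> simp [bSkipWs, h, ih]

lemma bToken_eq (l : List Char) : bToken l = (l.takeWhile tokP, l.dropWhile tokP) := by
  induction l with
  | nil => rfl
  | cons c cs ih =>
    by_cases h : (c == ':' || PySem.Chars.isspace c) = true <;>
      simp [bToken, List.takeWhile_cons, tokP, h, ih]

lemma colon_toList : (":" : String).toList = [':'] := by decide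

lemma bridge_a (role : String) : derive_role_short_py role = String.ofList (aCore role.toList) := by
  simp only [derive_role_short_py, aCore, PySem.Str.isIn, PySem.Str.find, PySem.Str.strip,
    PySem.Str.slice, PySem.Str.len, colon_toList, String.toList_ofList, apply_ite String.ofList]

lemma bridge_b (role : String) : derive_role_short_py_alt role = String.ofList (bCore role.toList) := by
  simp only [derive_role_short_py_alt, bCore]
  cases h : bSkipWs (bToken (bSkipWs role.toList)).2 with
  | nil => rfl
  | cons c rest =>
    by_cases hc : c == ':'
    · simp only [hc, if_true]
      split <;> rfl
    · simp only [hc]; rfl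

lemma find_first (pre post : List Char) (h : ':' ∉ pre) :
    PySem.Chars.find (pre ++ ':' :: post) [':'] = pre.length := by
  have hinf : [':'] <:+: (pre ++ ':' :: post) := (List.singleton_infix_iff ':' _).mpr (by simp)
  have h0 : 0 ≤ PySem.Chars.find (pre ++ ':' :: post) [':'] :=
    (PySem.Chars.find_nonneg_iff _ _).mpr hinf
  obtain ⟨hpref, hmin⟩ := PySem.Chars.find_spec h0
  set k := (PySem.Chars.find (pre ++ ':' :: post) [':']).toNat with hk
  have hkeq : k = pre.length := by
    rcases lt_trichotomy k pre.length with hlt | heq | hgt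
    · exfalso
      obtain ⟨t, ht⟩ := hpref
      rw [List.drop_append_of_le_length (le_of_lt hlt),
          List.drop_eq_getElem_cons hlt] at ht
      rw [List.cons_append] at ht
      have hek : pre[k] = ':' := by
        have := List.head_eq_of_cons_eq ht
        exact this.symm
      exact h (hek ▸ List.getElem_mem hlt)
    · exact heq
    · exfalso
      apply hmin pre.length hgt
      rw [List.drop_left]
      exact ⟨post, rfl⟩
  have := Int.toNat_of_nonneg h0
  omega

lemma mem_dropWhile_of_false {p : Char → Bool} {c : Char} {l : List Char}
    (hc : p c = false) (h : c ∈ l) : c ∈ l.dropWhile p := by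
  induction l with
  | nil => simp at h
  | cons a t ih =>
    by_cases ha : p a = true
    · simp [ha]
      rcases List.mem_cons.mp h with rfl | ht
      · rw [hc] at ha; exact absurd ha (by simp)
      · exact ih ht
    · rw [List.dropWhile_cons_of_neg (by simpa using ha)]; exact h

lemma lstrip_append_ws (w l : List Char) (hw : ∀ c ∈ w, PySem.Chars.isspace c = true) :
    (w ++ l).dropWhile PySem.Chars.isspace = l.dropWhile PySem.Chars.isspace := by
  rw [List.dropWhile_append]
  simp [List.dropWhile_eq_nil_iff.mpr hw]

lemma rstrip_eq_self (l : List Char) (h : ∀ c ∈ l, PySem.Chars.isspace c = false) :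
    PySem.Chars.rstrip l = l := by
  have : l.reverse.dropWhile PySem.Chars.isspace = l.reverse := by
    cases hr : l.reverse with
    | nil => rfl
    | cons a t =>
      have ha : PySem.Chars.isspace a = false := by
        apply h; have : a ∈ l.reverse := by rw [hr]; exact List.mem_cons_self
        simpa using this
      simp [ha]
  simp [PySem.Chars.rstrip, this]

lemma rstrip_append_allws (xs ys : List Char) (h : ∀ c ∈ ys, PySem.Chars.isspace c = true) :
    PySem.Chars.rstrip (xs ++ ys) = PySem.Chars.rstrip xs := by
  simp only [PySem.Chars.rstrip, List.reverse_append]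
  rw [lstrip_append_ws ys.reverse xs.reverse (by simpa using h)]

lemma rstrip_append_nonws (xs ys : List Char) (h : ∃ e ∈ ys, PySem.Chars.isspace e = false) :
    PySem.Chars.rstrip (xs ++ ys) = xs ++ PySem.Chars.rstrip ys := by
  simp only [PySem.Chars.rstrip, List.reverse_append]
  rw [List.dropWhile_append]
  have hne : ys.reverse.dropWhile PySem.Chars.isspace ≠ [] := by
    rw [Ne, List.dropWhile_eq_nil_iff]
    intro hall
    obtain ⟨e, he, hef⟩ := h
    rw [hall e (by simpa using he)] at hef
    simp at hef
  simp [List.isEmpty_iff, hne]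

lemma strip_eq_nil_iff (l : List Char) :
    PySem.Chars.strip l = [] ↔ ∀ c ∈ l, PySem.Chars.isspace c = true := by
  constructor
  · intro hs
    by_contra hne
    obtain ⟨c, hc, hcf⟩ : ∃ c ∈ l, ¬ PySem.Chars.isspace c = true := by
      simpa using hne
    have hcf' : PySem.Chars.isspace c = false := Bool.not_eq_true _ ▸ by simpa using hcf
    have h1 : c ∈ PySem.Chars.lstrip l := mem_dropWhile_of_false hcf' hc
    have h2 : c ∈ PySem.Chars.rstrip (PySem.Chars.lstrip l) := by
      simp only [PySem.Chars.rstrip]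
      have := mem_dropWhile_of_false (l := (PySem.Chars.lstrip l).reverse) hcf' (by simpa using h1)
      simpa using this
    rw [show PySem.Chars.strip l = PySem.Chars.rstrip (PySem.Chars.lstrip l) from rfl] at hs
    simp [hs] at h2
  · intro h
    have : PySem.Chars.lstrip l = [] := List.dropWhile_eq_nil_iff.mpr h
    show PySem.Chars.rstrip (PySem.Chars.lstrip l) = []
    rw [this]; rfl

lemma dropWhile_head_false {p : Char → Bool} {l res : List Char} {c : Char}
    (h : l.dropWhile p = c :: res) : p c = false := by
  induction l with
  | nil => simp at h
  | cons a as ih =>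
    rw [List.dropWhile_cons] at h
    split at h
    · exact ih h
    · next hpa =>
      obtain ⟨rfl, -⟩ := List.cons.injEq .. ▸ h
      simpa using hpa

lemma cond_eq (c : Char) (tl post : List Char)
    (hany : (c :: tl).any PySem.Chars.isspace = false) :
    (if (((c :: tl).length : Int) == 0 || ((PySem.Chars.strip post).length : Int) == 0) then ([] : List Char) else
     if MAX_ROLE_SHORT_LEN < ((c :: tl).length : Int) then [] else
     if (c :: tl).any PySem.Chars.isspace then [] else c :: tl)
    = (if (c :: tl).length != 0 && decide ((c :: tl).length ≤ 32) && post.any (fun x => !PySem.Chars.isspace x) then c :: tl else []) := by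
  have h1 : (((c :: tl).length : Int) == 0) = false := by
    rw [beq_eq_false_iff_ne]
    simp only [List.length_cons]
    omega
  by_cases hp : post.any (fun x => !PySem.Chars.isspace x) = true
  · have hrne : PySem.Chars.strip post ≠ [] := by
      intro h0
      have hall := (strip_eq_nil_iff post).mp h0
      simp only [List.any_eq_true] at hp
      obtain ⟨e, he, hef⟩ := hp
      rw [hall e he] at hef
      simp at hef
    have h3 : (((PySem.Chars.strip post).length : Int) == 0) = false := by
      simp [List.length_eq_zero_iff, hrne]
    rw [h1, h3]
    have hl1 : ((c :: tl).length != 0) = true := by simp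
    by_cases hl : (c :: tl).length ≤ 32
    · have hmax : ¬ MAX_ROLE_SHORT_LEN < (((c :: tl).length : Int)) := by
        simp only [MAX_ROLE_SHORT_LEN, List.length_cons]
        simp only [List.length_cons] at hl
        push_cast
        omega
      rw [if_neg (by simp), if_neg hmax, if_neg (by simp [hany]),
          if_pos (by rw [hl1, decide_eq_true hl, hp]; rfl)]
    · have hmax : MAX_ROLE_SHORT_LEN < (((c :: tl).length : Int)) := by
        simp only [MAX_ROLE_SHORT_LEN, List.length_cons]
        simp only [List.length_cons] at hl
        push_cast
        omega
      rw [if_neg (by simp), if_pos hmax, decide_eq_false hl]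
      simp
  · have hpf : post.any (fun x => !PySem.Chars.isspace x) = false := by
      simpa using hp
    have hall : ∀ e ∈ post, PySem.Chars.isspace e = true := by
      intro e he
      have := List.any_eq_false.mp hpf e he
      simpa using this
    have hnil : PySem.Chars.strip post = [] := (strip_eq_nil_iff post).mpr hall
    rw [hnil]
    simp [hpf]

lemma isspace_colon : PySem.Chars.isspace ':' = false := by decide

lemma tokP_colon : tokP ':' = false := by decide

theorem core_eq (cs : List Char) : aCore cs = bCore cs := by
  by_cases hmem : ':' ∈ cs
  · -- the string contains a colon; split at the FIRST one
    obtain ⟨pre, post, hcs, hpre⟩ := List.eq_append_cons_of_mem hmem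
    subst hcs
    have hfind := find_first pre post hpre
    have hisin : PySem.Chars.isIn [':'] (pre ++ ':' :: post) = true := by
      simp only [PySem.Chars.isIn, hfind, bne_iff_ne, Ne]
      omega
    have hsliceL : PySem.Chars.slice (pre ++ ':' :: post) none (some (PySem.Chars.find (pre ++ ':' :: post) [':'])) = pre := by
      rw [hfind, PySem.Chars.slice_eq_listSlice, PySem.List.slice_to _ (by positivity)]
      simp [List.take_left']
    have hsliceR : PySem.Chars.slice (pre ++ ':' :: post) (some (PySem.Chars.find (pre ++ ':' :: post) [':'] + 1)) none = post := by
      rw [hfind, PySem.Chars.slice_eq_listSlice]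
      rw [show ((pre.length : Int) + 1) = ((pre.length + 1 : Nat) : Int) by push_cast; ring]
      rw [PySem.List.slice_from _ (by positivity)]
      rw [Int.toNat_natCast]
      rw [show pre ++ ':' :: post = (pre ++ [':']) ++ post by simp]
      rw [show pre.length + 1 = (pre ++ [':']).length by simp]
      exact List.drop_left
    have hA : aCore (pre ++ ':' :: post) =
        (if ((PySem.Chars.strip pre).length : Int) == 0 || ((PySem.Chars.strip post).length : Int) == 0 then [] else
         if MAX_ROLE_SHORT_LEN < ((PySem.Chars.strip pre).length : Int) then [] else
         if (PySem.Chars.strip pre).any PySem.Chars.isspace then [] else PySem.Chars.strip pre) := by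
      simp only [aCore, hisin, hsliceL, hsliceR, Bool.not_true, Bool.false_eq_true, if_false]
    by_cases hallws : ∀ c ∈ pre, PySem.Chars.isspace c = true
    · -- empty candidate: both return []
      have hcand : PySem.Chars.strip pre = [] := (strip_eq_nil_iff pre).mpr hallws
      have hs1 : bSkipWs (pre ++ ':' :: post) = ':' :: post := by
        rw [bSkipWs_eq, lstrip_append_ws pre _ hallws, List.dropWhile_cons_of_neg (by simp [isspace_colon])]
      have htok : bToken (':' :: post) = ([], ':' :: post) := by
        rw [bToken_eq, List.takeWhile_cons_of_neg (by simp [tokP_colon]),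
            List.dropWhile_cons_of_neg (by simp [tokP_colon])]
      have hs3 : bSkipWs (':' :: post) = ':' :: post := by
        rw [bSkipWs_eq, List.dropWhile_cons_of_neg (by simp [isspace_colon])]
      have hB : bCore (pre ++ ':' :: post) = [] := by
        simp only [bCore, hs1, htok, hs3]
        simp
      rw [hA, hB, hcand]
      simp
    · -- pre holds a non-space char; take the first one: pre = w ++ c :: t0, w all space, c non-space
      have hdwne : pre.dropWhile PySem.Chars.isspace ≠ [] := by
        rw [Ne, List.dropWhile_eq_nil_iff]
        exact hallws
      obtain ⟨c, t0, hct⟩ : ∃ c t0, pre.dropWhile PySem.Chars.isspace = c :: t0 := by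
        rcases h : pre.dropWhile PySem.Chars.isspace with _ | ⟨c, t0⟩
        · exact absurd h hdwne
        · exact ⟨c, t0, rfl⟩
      have hcws : PySem.Chars.isspace c = false := dropWhile_head_false hct
      have hwall : ∀ x ∈ pre.takeWhile PySem.Chars.isspace, PySem.Chars.isspace x = true :=
        fun x hx => List.mem_takeWhile_imp hx
      have hpre_eq : pre = pre.takeWhile PySem.Chars.isspace ++ c :: t0 := by
        rw [← hct, List.takeWhile_append_dropWhile]
      have hcne : c ≠ ':' := fun hcc => hpre (hcc ▸ (hpre_eq ▸ (by simp : c ∈ pre.takeWhile PySem.Chars.isspace ++ c :: t0)))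
      have htokc : tokP c = true := by
        simp [tokP, hcws, hcne]
      have hs1 : bSkipWs (pre ++ ':' :: post) = c :: (t0 ++ ':' :: post) := by
        conv_lhs => rw [hpre_eq]
        rw [List.append_assoc, List.cons_append, bSkipWs_eq,
            lstrip_append_ws _ _ hwall, List.dropWhile_cons_of_neg (by simp [hcws])]
      have htk_t0 : (t0 ++ ':' :: post).takeWhile tokP = t0.takeWhile tokP := by
        rw [List.takeWhile_append]
        split
        · next hfull =>
          rw [List.takeWhile_cons_of_neg (by simp [tokP_colon]), List.append_nil]
          exact ((List.Sublist.eq_of_length (List.takeWhile_sublist _) hfull)).symm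
        · rfl
      have htok : bToken (c :: (t0 ++ ':' :: post)) = (c :: t0.takeWhile tokP, (t0 ++ ':' :: post).dropWhile tokP) := by
        rw [bToken_eq, List.takeWhile_cons_of_pos htokc, List.dropWhile_cons_of_pos htokc, htk_t0]
      have hnonws_tok : ∀ x ∈ c :: t0.takeWhile tokP, PySem.Chars.isspace x = false := by
        intro x hx
        rcases List.mem_cons.mp hx with rfl | hx'
        · exact hcws
        · have htx : tokP x = true := List.mem_takeWhile_imp hx'
          simp only [tokP, Bool.not_eq_eq_eq_not, Bool.not_true, Bool.or_eq_false_iff] at htx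
          exact htx.2
      have hanyf : (c :: t0.takeWhile tokP).any PySem.Chars.isspace = false :=
        List.any_eq_false.mpr (by intro x hx; simp [hnonws_tok x hx])
      rcases hr : t0.dropWhile tokP with _ | ⟨d, r'⟩
      · -- the whole t0 belongs to the token
        have ht0tw : t0.takeWhile tokP = t0 := by
          have := List.takeWhile_append_dropWhile (p := tokP) (l := t0)
          rw [hr, List.append_nil] at this
          exact this
        have hs2 : (t0 ++ ':' :: post).dropWhile tokP = ':' :: post := by
          rw [List.dropWhile_append, hr]
          simp [List.dropWhile_cons_of_neg (by simp [tokP_colon] : ¬ tokP ':' = true)]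
        have hs3 : bSkipWs (':' :: post) = ':' :: post := by
          rw [bSkipWs_eq, List.dropWhile_cons_of_neg (by simp [isspace_colon])]
        have hB : bCore (pre ++ ':' :: post) =
            (if (c :: t0).length != 0 && decide ((c :: t0).length ≤ 32) && post.any (fun x => !PySem.Chars.isspace x)
             then c :: t0 else []) := by
          simp only [bCore, hs1, htok, hs2, hs3, ht0tw]
          simp
        have hcand : PySem.Chars.strip pre = c :: t0 := by
          conv_lhs => rw [hpre_eq]
          show PySem.Chars.rstrip (PySem.Chars.lstrip _) = _
          rw [show PySem.Chars.lstrip (pre.takeWhile PySem.Chars.isspace ++ c :: t0) = c :: t0 by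
            simp only [PySem.Chars.lstrip]
            rw [lstrip_append_ws _ _ hwall, List.dropWhile_cons_of_neg (by simp [hcws])]]
          exact rstrip_eq_self _ (ht0tw ▸ hnonws_tok)
        rw [hA, hB, hcand]
        exact cond_eq c t0 post (ht0tw ▸ hanyf)
      · -- token stops inside t0 at a whitespace d
        have hdmem : d ∈ t0 := by
          have : d ∈ t0.dropWhile tokP := by rw [hr]; simp
          exact (List.dropWhile_sublist _).mem this
        have hdtok : tokP d = false := dropWhile_head_false hr
        have hdne : d ≠ ':' := fun hdd => hpre (hdd ▸ (hpre_eq ▸ (by simp [hdmem] : d ∈ pre.takeWhile PySem.Chars.isspace ++ c :: t0)))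
        have hdws : PySem.Chars.isspace d = true := by
          simp only [tokP, Bool.not_eq_eq_eq_not, Bool.not_false, Bool.or_eq_true_iff] at hdtok
          rcases hdtok with h | h
          · exact absurd (by simpa using h) hdne
          · exact h
        have ht0_split : t0 = t0.takeWhile tokP ++ d :: r' := by
          rw [← hr, List.takeWhile_append_dropWhile]
        have hs2 : (t0 ++ ':' :: post).dropWhile tokP = d :: (r' ++ ':' :: post) := by
          rw [List.dropWhile_append, hr]
          simp
        have hs3 : bSkipWs (d :: (r' ++ ':' :: post)) = (r' ++ ':' :: post).dropWhile PySem.Chars.isspace := by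
          rw [bSkipWs_eq, List.dropWhile_cons_of_pos hdws]
        by_cases hrall : ∀ x ∈ r', PySem.Chars.isspace x = true
        · -- only whitespace between the token and the colon
          have hs3' : (r' ++ ':' :: post).dropWhile PySem.Chars.isspace = ':' :: post := by
            rw [lstrip_append_ws _ _ hrall, List.dropWhile_cons_of_neg (by simp [isspace_colon])]
          have hB : bCore (pre ++ ':' :: post) =
              (if (c :: t0.takeWhile tokP).length != 0 && decide ((c :: t0.takeWhile tokP).length ≤ 32) && post.any (fun x => !PySem.Chars.isspace x)
               then c :: t0.takeWhile tokP else []) := by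
            simp only [bCore, hs1, htok, hs2, hs3, hs3']
            simp
          have hcand : PySem.Chars.strip pre = c :: t0.takeWhile tokP := by
            conv_lhs => rw [hpre_eq]
            show PySem.Chars.rstrip (PySem.Chars.lstrip _) = _
            rw [show PySem.Chars.lstrip (pre.takeWhile PySem.Chars.isspace ++ c :: t0) = c :: t0 by
              simp only [PySem.Chars.lstrip]
              rw [lstrip_append_ws _ _ hwall, List.dropWhile_cons_of_neg (by simp [hcws])]]
            conv_lhs => rw [ht0_split]
            rw [show (c :: (t0.takeWhile tokP ++ d :: r')) = (c :: t0.takeWhile tokP) ++ (d :: r') by simp]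
            rw [rstrip_append_allws _ _ (by
              intro x hx
              rcases List.mem_cons.mp hx with rfl | hx'
              · exact hdws
              · exact hrall x hx')]
            exact rstrip_eq_self _ hnonws_tok
          rw [hA, hB, hcand]
          exact cond_eq c (t0.takeWhile tokP) post hanyf
        · -- a second non-space run before the colon: both return []
          have hrne : r'.dropWhile PySem.Chars.isspace ≠ [] := by
            rw [Ne, List.dropWhile_eq_nil_iff]
            exact hrall
          obtain ⟨e, r'', her⟩ : ∃ e r'', r'.dropWhile PySem.Chars.isspace = e :: r'' := by
            rcases h : r'.dropWhile PySem.Chars.isspace with _ | ⟨e, r''⟩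
            · exact absurd h hrne
            · exact ⟨e, r'', rfl⟩
          have hews : PySem.Chars.isspace e = false := dropWhile_head_false her
          have hemem : e ∈ r' := by
            have : e ∈ r'.dropWhile PySem.Chars.isspace := by rw [her]; simp
            exact (List.dropWhile_sublist _).mem this
          have heprem : e ∈ pre := by
            rw [hpre_eq, ht0_split]
            simp [hemem]
          have hene : e ≠ ':' := fun hee => hpre (hee ▸ heprem)
          have hs3' : (r' ++ ':' :: post).dropWhile PySem.Chars.isspace = e :: (r'' ++ ':' :: post) := by
            rw [List.dropWhile_append, her]
            simp
          have hB : bCore (pre ++ ':' :: post) = [] := by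
            simp only [bCore, hs1, htok, hs2, hs3, hs3']
            simp [hene]
          -- A also returns []: the stripped candidate keeps the inner whitespace d
          have hcand : PySem.Chars.strip pre = (c :: t0.takeWhile tokP) ++ d :: PySem.Chars.rstrip r' := by
            conv_lhs => rw [hpre_eq]
            show PySem.Chars.rstrip (PySem.Chars.lstrip _) = _
            rw [show PySem.Chars.lstrip (pre.takeWhile PySem.Chars.isspace ++ c :: t0) = c :: t0 by
              simp only [PySem.Chars.lstrip]
              rw [lstrip_append_ws _ _ hwall, List.dropWhile_cons_of_neg (by simp [hcws])]]
            conv_lhs => rw [ht0_split]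
            rw [show (c :: (t0.takeWhile tokP ++ d :: r')) = ((c :: t0.takeWhile tokP) ++ [d]) ++ r' by simp]
            rw [rstrip_append_nonws _ _ ⟨e, hemem, hews⟩]
            simp
          have hanyt : (PySem.Chars.strip pre).any PySem.Chars.isspace = true := by
            rw [hcand]
            refine List.any_eq_true.mpr ⟨d, by simp, by simp [hdws]⟩
          rw [hA, hB]
          rw [hanyt]
          split
          · rfl
          · split
            · rfl
            · simp
  · -- no colon: both return []
    have hfind : PySem.Chars.find cs [':'] = -1 :=
      (PySem.Chars.find_eq_neg_one_iff _ _).mpr (fun hinf => hmem ((List.singleton_infix_iff ':' cs).mp hinf))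
    have hA : aCore cs = [] := by
      simp [aCore, PySem.Chars.isIn, hfind]
    have hB : bCore cs = [] := by
      rcases h3 : bSkipWs (bToken (bSkipWs cs)).2 with _ | ⟨c, rest⟩
      · simp [bCore, h3]
      · have hcmem : c ∈ cs := by
          have h1 : c ∈ bSkipWs (bToken (bSkipWs cs)).2 := by rw [h3]; simp
          rw [bSkipWs_eq] at h1
          have h2 := (List.dropWhile_sublist _).mem h1
          rw [bToken_eq] at h2
          have h4 := (List.dropWhile_sublist _).mem h2
          rw [bSkipWs_eq] at h4
          exact (List.dropWhile_sublist _).mem h4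
        have hcne : c ≠ ':' := fun hcc => hmem (hcc ▸ hcmem)
        simp [bCore, h3, hcne]
    rw [hA, hB]

-- ===== VERDICT (by name: the statement is the Claim_ definition above) =====
theorem derive_role_short_py_spec : Claim_equal_derive_role_short_py := by
  intro role _
  show derive_role_short_py role = derive_role_short_py_alt role
  rw [bridge_a, bridge_b, core_eq]
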